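-- pv_equiv track=rewrite | github.com/080user080/styletts2-ukrainian | допрацювання/book-tts-main/src/text_utils.py | split_by_middle
-- ===== SOURCE A (Python) =====
-- def split_by_middle(text):
--     if len(text) <= 350:
--         return [text]
--
--     middle_index = len(text) // 2
--     symbols = [',', '-']
--
--     # Перевірка наявності хоча б одного символу в тексті
--     positions = [
--         (text.rfind(symbol, 0, middle_index), text.find(symbol, middle_index))
--         for symbol in symbols if symbol in text
--     ]
--
--     # Якщо не знайдено жодного символу, додаємо перевірку на порожній список
--     if positions:
--         closest_symbol_index = min(positions, key=lambda x: min(x[0], x[1]))[0]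
--         if closest_symbol_index != -1:
--             return split_by_middle(text[:closest_symbol_index] + '.') + split_by_middle(text[closest_symbol_index + 1:])
--
--     # Пошук пробілів до і після середини
--     before_middle_space = text.rfind(' ', 0, middle_index)
--     after_middle_space = text.find(' ', middle_index)
--
--     # Логіка для розбиття за пробілами
--     if before_middle_space != -1 and (after_middle_space == -1 or middle_index - before_middle_space < after_middle_space - middle_index):
--         return split_by_middle(text[:before_middle_space] + '.') + split_by_middle(text[before_middle_space + 1:])
--     elif after_middle_space != -1:
--         return split_by_middle(text[:after_middle_space] + '.') + split_by_middle(text[after_middle_space + 1:])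
--
--     # Якщо немає жодного зручного символу для розбиття
--     return [text]
-- ===== SOURCE B (Python) =====
-- def _split_point(t):
--     """Return the index to split t at, or None if t is a leaf."""
--     if len(t) <= 350:
--         return None
--     mid = len(t) // 2
--     best_key = None
--     best = -1
--     for sym in ',-':
--         if sym in t:
--             l = t.rfind(sym, 0, mid)
--             r = t.find(sym, mid)
--             k = l if l < r else r
--             if best_key is None or k < best_key:
--                 best_key, best = k, l
--     if best_key is not None and best != -1:
--         return best
--     b = t.rfind(' ', 0, mid)
--     a = t.find(' ', mid)
--     if b != -1 and (a == -1 or mid - b < a - mid):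
--         return b
--     if a != -1:
--         return a
--     return None
--
--
-- def split_by_middle(text):
--     out = []
--     stack = [text]
--     while stack:
--         t = stack.pop()
--         idx = _split_point(t)
--         if idx is None:
--             out.append(t)
--         else:
--             stack.append(t[idx + 1:])
--             stack.append(t[:idx] + '.')
--     return out
-- ===== Notes on version B (the rewrite author's own statement) =====
-- stated objective: alternative
-- what changed: Replaces A's recursion by an iterative explicit-stack worklist (pop a chunk, push right then left subproblem, append leaves to a result list) and replaces A's positions-list comprehension plus min(key=...) by a single accumulator fold over the symbols keeping the best (key, index) pair.
import Mathlib
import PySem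

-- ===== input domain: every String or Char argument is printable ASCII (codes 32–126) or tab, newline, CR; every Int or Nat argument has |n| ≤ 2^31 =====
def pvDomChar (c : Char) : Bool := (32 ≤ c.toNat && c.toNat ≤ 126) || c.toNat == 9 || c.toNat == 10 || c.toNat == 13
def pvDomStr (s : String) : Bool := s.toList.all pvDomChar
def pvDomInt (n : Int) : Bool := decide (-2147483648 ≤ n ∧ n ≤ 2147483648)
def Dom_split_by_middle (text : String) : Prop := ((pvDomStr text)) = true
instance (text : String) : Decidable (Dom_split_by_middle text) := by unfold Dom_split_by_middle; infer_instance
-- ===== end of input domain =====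

-- B replaces A's recursion by an iterative explicit-stack worklist with an accumulator-style
-- split-point decision (objective: alternative decomposition; same asymptotic cost).

-- ===== PORT A =====
-- A's split decision, exactly A's steps: the comma/dash positions comprehension, Python's
-- min-by-key over it (first minimal wins), then the space fallback.  Returns the split index.
def pickA (t : List Char) : Option Int :=
  if t.length ≤ 350 then none
  else
    let mid : Int := PySem.Int.floordiv (t.length : Int) 2
    let positions := ([',', '-'].filter (fun c => PySem.Chars.isIn [c] t)).map
        (fun c => (PySem.Chars.rfindFrom t [c] 0 (some mid), PySem.Chars.findFrom t [c] mid none))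
    let viaSym : Option Int :=
      if positions.isEmpty then none
      else
        let closest := (PySem.List.minD positions (fun x => min x.1 x.2) (0, 0)).1
        if closest ≠ -1 then some closest else none
    match viaSym with
    | some i => some i
    | none =>
      let bms := PySem.Chars.rfindFrom t [' '] 0 (some mid)
      let ams := PySem.Chars.findFrom t [' '] mid none
      if bms ≠ -1 ∧ (ams = -1 ∨ mid - bms < ams - mid) then some bms
      else if ams ≠ -1 then some ams
      else none

-- fuel: a totality guard only; each recursive call strictly shrinks length + split-char count,
-- so this bound is never exhausted on real inputs
def pvFuel (t : List Char) : Nat := t.length + (t.count ',' + t.count '-' + t.count ' ') + 1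

-- A's recursion: split, recurse on text[:i] + '.' and text[i+1:], concatenate
def goA : Nat → List Char → List (List Char)
  | 0, t => [t]   -- fuel guard
  | f+1, t =>
    match pickA t with
    | none => [t]
    | some i =>
        goA f (PySem.List.slice t none (some i) ++ ['.']) ++
        goA f (PySem.List.slice t (some (i + 1)) none)

def split_by_middle (text : String) : List String :=
  (goA (pvFuel text.toList) text.toList).map String.ofList

-- ===== PORT B =====
-- B's split decision: a single fold over the symbols maintaining (best key, best index),
-- then the same space fallback.
def pickB (t : List Char) : Option Int :=
  if t.length ≤ 350 then none
  else
    let mid : Int := PySem.Int.floordiv (t.length : Int) 2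
    let best := [',', '-'].foldl (fun (b : Option (Int × Int)) sym =>
        if PySem.Chars.isIn [sym] t then
          let l := PySem.Chars.rfindFrom t [sym] 0 (some mid)
          let r := PySem.Chars.findFrom t [sym] mid none
          let k := if l < r then l else r
          match b with
          | none => some (k, l)
          | some (bk, bl) => if k < bk then some (k, l) else some (bk, bl)
        else b) none
    let symPick : Option Int :=
      match best with
      | some (_, bl) => if bl ≠ -1 then some bl else none
      | none => none
    match symPick with
    | some i => some i
    | none =>
      let bsp := PySem.Chars.rfindFrom t [' '] 0 (some mid)
      let asp := PySem.Chars.findFrom t [' '] mid none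
      if bsp ≠ -1 ∧ (asp = -1 ∨ mid - bsp < asp - mid) then some bsp
      else if asp ≠ -1 then some asp
      else none

-- B's worklist loop: pop a chunk; leaf → append to result; else push right then left
-- (each stack entry carries its fuel, a totality guard only)
def goB : List (Nat × List Char) → List (List Char) → List (List Char)
  | [], acc => acc
  | (0, t) :: rest, acc => goB rest (acc ++ [t])   -- fuel guard
  | (f+1, t) :: rest, acc =>
    match pickB t with
    | none => goB rest (acc ++ [t])
    | some i =>
        goB ((f, PySem.List.slice t none (some i) ++ ['.']) ::
             (f, PySem.List.slice t (some (i + 1)) none) :: rest) acc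
termination_by stack _ => (stack.map (fun p => 3 ^ p.1)).sum
decreasing_by
  · simp only [List.map_cons, List.sum_cons]; omega
  · simp only [List.map_cons, List.sum_cons]
    have h : 0 < 3 ^ (f + 1) := pow_pos (by omega) _
    omega
  · simp only [List.map_cons, List.sum_cons, pow_succ]
    have h : 0 < 3 ^ f := pow_pos (by omega) _
    omega

def split_by_middle_alt (text : String) : List String :=
  (goB [(pvFuel text.toList, text.toList)] []).map String.ofList

-- ===== PRECONDITION & SPEC =====
def Spec_split_by_middle (text : String) (out : List String) : Prop := out = split_by_middle_alt text
instance (text : String) (out : List String) : Decidable (Spec_split_by_middle text out) := by unfold Spec_split_by_middle; infer_instance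

-- ===== CLAIM (what is proved, stated in full; the proofs are below) =====
def Claim_equal_split_by_middle : Prop := ∀ (text : String), Dom_split_by_middle text → Spec_split_by_middle text (split_by_middle text)

-- ===== LEMMAS AND PROOFS =====

-- rfind/findFrom never return below -1 (needed to discharge the min-comparison case bash)
lemma rfind_go_ge (s sub : List Char) : ∀ j, -1 ≤ PySem.Chars.rfind.go s sub j := by
  intro j; induction j with
  | zero => simp [PySem.Chars.rfind.go]; split_ifs <;> omega
  | succ k ih => simp [PySem.Chars.rfind.go]; split_ifs <;> [omega; exact ih]

lemma neg_one_le_rfind (s sub : List Char) : -1 ≤ PySem.Chars.rfind s sub := by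
  unfold PySem.Chars.rfind; exact rfind_go_ge s sub s.length

lemma ffAux (n st e r : Int) (hr : -1 ≤ r) :
    -1 ≤ (if e < (if st < 0 then if st + n < 0 then 0 else st + n else st) then (-1 : Int)
          else if r = -1 then -1 else (if st < 0 then if st + n < 0 then 0 else st + n else st) + r) := by
  split_ifs <;> omega

lemma neg_one_le_rfindFrom (s sub : List Char) (st : Int) (e? : Option Int) :
    -1 ≤ PySem.Chars.rfindFrom s sub st e? := by
  unfold PySem.Chars.rfindFrom
  exact ffAux _ _ _ _ (neg_one_le_rfind _ _)

lemma neg_one_le_findFrom (s sub : List Char) (st : Int) (e? : Option Int) :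
    -1 ≤ PySem.Chars.findFrom s sub st e? := by
  unfold PySem.Chars.findFrom
  exact ffAux _ _ _ _ (PySem.Chars.neg_one_le_find _ _)

-- the two split decisions agree
set_option maxHeartbeats 1000000 in
lemma pick_eq (t : List Char) : pickA t = pickB t := by
  unfold pickA pickB
  by_cases hlen : t.length ≤ 350
  · simp [hlen]
  · rw [if_neg hlen, if_neg hlen]
    have b1 := neg_one_le_rfindFrom t [','] 0 (some (PySem.Int.floordiv (t.length : Int) 2))
    have b2 := neg_one_le_findFrom t [','] (PySem.Int.floordiv (t.length : Int) 2) none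
    have b3 := neg_one_le_rfindFrom t ['-'] 0 (some (PySem.Int.floordiv (t.length : Int) 2))
    have b4 := neg_one_le_findFrom t ['-'] (PySem.Int.floordiv (t.length : Int) 2) none
    have b5 := neg_one_le_rfindFrom t [' '] 0 (some (PySem.Int.floordiv (t.length : Int) 2))
    have b6 := neg_one_le_findFrom t [' '] (PySem.Int.floordiv (t.length : Int) 2) none
    by_cases h1 : PySem.Chars.isIn [','] t = true <;>
    by_cases h2 : PySem.Chars.isIn ['-'] t = true <;>
      simp only [h1, h2, List.filter_cons, List.filter_nil, List.map_cons, List.map_nil,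
        PySem.List.minD, PySem.List.min?, List.foldl_cons, List.foldl_nil,
        Option.getD_some, Option.getD_none, List.isEmpty_cons, List.isEmpty_nil,
        Bool.false_eq_true, if_true, if_false] <;>
      (generalize hg1 : PySem.Chars.rfindFrom t [','] 0 (some (PySem.Int.floordiv (t.length : Int) 2)) = l1 at *
       generalize hg2 : PySem.Chars.findFrom t [','] (PySem.Int.floordiv (t.length : Int) 2) none = r1 at *
       generalize hg3 : PySem.Chars.rfindFrom t ['-'] 0 (some (PySem.Int.floordiv (t.length : Int) 2)) = l2 at *
       generalize hg4 : PySem.Chars.findFrom t ['-'] (PySem.Int.floordiv (t.length : Int) 2) none = r2 at *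
       generalize hg5 : PySem.Chars.rfindFrom t [' '] 0 (some (PySem.Int.floordiv (t.length : Int) 2)) = bs at *
       generalize hg6 : PySem.Chars.findFrom t [' '] (PySem.Int.floordiv (t.length : Int) 2) none = asp at *
       clear hg1 hg2 hg3 hg4 hg5 hg6 h1 h2 hlen <;>
       simp only [min_def] <;>
       split_ifs <;> first | rfl | omega | (simp; omega) | (simp; split_ifs <;> simp_all <;> omega))

-- B's stack loop processes one annotated chunk into exactly A's recursion result
lemma goB_cons (f : Nat) : ∀ (t : List Char) (rest : List (Nat × List Char)) (acc : List (List Char)),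
    goB ((f, t) :: rest) acc = goB rest (acc ++ goA f t) := by
  induction f with
  | zero => intro t rest acc; simp [goB, goA]
  | succ f ih =>
    intro t rest acc
    rw [goB]
    cases h : pickB t with
    | none => simp only [goA, pick_eq t, h]
    | some i =>
      simp only [goA, pick_eq t, h, ih, List.append_assoc]

-- ===== VERDICT (by name: the statement is the Claim_ definition above) =====
theorem split_by_middle_spec : Claim_equal_split_by_middle := by
  intro text _
  unfold Spec_split_by_middle split_by_middle split_by_middle_alt
  rw [goB_cons]
  simp [goB]
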